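-- pv_equiv track=rewrite | github.com/smsxgz/euler_project | problems/problem@41~60/problem_41/Pandigital_prime.py | permutation1
-- ===== SOURCE A (Python) =====
-- def permutation1(dig_list):
--     n = len(dig_list)
--     if n == 1:
--         m = dig_list[0]
--         if m in [1, 3, 7]:
--             return [[m]]
--         else:
--             return []
--     l = []
--     for i in range(n):
--         j = dig_list[i]
--         for ll in permutation1(dig_list[:i] + dig_list[i + 1:]):
--             l.append([j] + ll)
--     return l
-- ===== SOURCE B (Python) =====
-- def permutation1(dig_list):
--     # Iterative level-by-level (BFS) expansion of (prefix, remaining) states,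
--     # then one final filter on the last digit.
--     frontier = [([], list(dig_list))]
--     for _ in range(len(dig_list)):
--         frontier = [(pre + [rem[i]], rem[:i] + rem[i + 1:])
--                     for pre, rem in frontier
--                     for i in range(len(rem))]
--     return [pre for pre, _ in frontier if pre and pre[-1] in (1, 3, 7)]
-- ===== Notes on version B (the rewrite author's own statement) =====
-- stated objective: alternative
-- what changed: A enumerates permutations by a depth-first recursion that applies the 1/3/7 last-digit test at the singleton base case; B instead expands a (prefix, remaining) frontier iteratively level by level (breadth-first, no recursion) and applies the last-digit filter once at the end.
import Mathlib
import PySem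

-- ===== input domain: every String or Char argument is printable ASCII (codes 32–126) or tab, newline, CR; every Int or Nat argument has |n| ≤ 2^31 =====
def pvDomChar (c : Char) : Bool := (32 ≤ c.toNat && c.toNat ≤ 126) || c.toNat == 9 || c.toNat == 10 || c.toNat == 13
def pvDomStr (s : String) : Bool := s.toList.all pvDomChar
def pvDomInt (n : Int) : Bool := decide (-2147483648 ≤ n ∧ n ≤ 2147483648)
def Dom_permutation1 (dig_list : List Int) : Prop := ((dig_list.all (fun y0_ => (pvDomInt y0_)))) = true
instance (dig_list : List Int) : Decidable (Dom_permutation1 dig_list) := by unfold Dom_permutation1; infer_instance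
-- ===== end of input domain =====

-- B replaces A's filter-at-the-base DFS recursion by an iterative level-by-level (BFS)
-- frontier expansion followed by one final last-digit filter (objective: alternative).

-- ===== PORT A =====
-- literal transliteration of A's recursion: singleton base case with the 1/3/7 test,
-- else a loop over i appending [j]+ll for each recursive permutation of the slices.
def permutation1 (dig_list : List Int) : List (List Int) :=
  let n := dig_list.length
  if n = 1 then
    let m := PySem.List.pyGetD dig_list 0 0
    if m = 1 ∨ m = 3 ∨ m = 7 then [[m]] else []
  else
    (List.range n).attach.foldl (fun l i =>
      let j := PySem.List.pyGetD dig_list (i.1 : Int) 0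
      (permutation1 (PySem.List.slice dig_list (some 0) (some (i.1 : Int)) ++
                     PySem.List.slice dig_list (some ((i.1 : Int) + 1)) none)).foldl
        (fun l ll => l ++ [j :: ll]) l) []
termination_by dig_list.length
decreasing_by
  have hi : i.1 < dig_list.length := List.mem_range.mp i.2
  simp [PySem.List.slice_zero_start, PySem.List.slice_to_natCast]
  rw [show ((i.1 : Int) + 1) = ((i.1 + 1 : Nat) : Int) by push_cast; ring,
     PySem.List.slice_from_natCast]
  simp
  omega

-- ===== PORT B =====
-- literal transliteration of Source B: BFS over (prefix, remaining) pairs, then filter.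
def permutation1_alt (dig_list : List Int) : List (List Int) :=
  let frontier0 : List (List Int × List Int) := [([], dig_list)]
  let frontier := (List.range dig_list.length).foldl (fun fr _ =>
    fr.flatMap (fun pr =>
      (List.range pr.2.length).map (fun (i : Nat) =>
        (pr.1 ++ [PySem.List.pyGetD pr.2 (i : Int) 0],
         PySem.List.slice pr.2 (some 0) (some (i : Int)) ++
         PySem.List.slice pr.2 (some ((i : Int) + 1)) none)))) frontier0
  (frontier.filter (fun pr =>
      decide (pr.1 ≠ []) &&
        (PySem.List.pyGetD pr.1 (-1) 0 == 1 || PySem.List.pyGetD pr.1 (-1) 0 == 3 ||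
         PySem.List.pyGetD pr.1 (-1) 0 == 7))).map Prod.fst

-- ===== PRECONDITION & SPEC =====
def Spec_permutation1 (dig_list : List Int) (out : List (List Int)) : Prop := out = permutation1_alt dig_list
instance (dig_list : List Int) (out : List (List Int)) : Decidable (Spec_permutation1 dig_list out) := by unfold Spec_permutation1; infer_instance

-- ===== CLAIM (what is proved, stated in full; the proofs are below) =====
def Claim_equal_permutation1 : Prop := ∀ (dig_list : List Int), Dom_permutation1 dig_list → Spec_permutation1 dig_list (permutation1 dig_list)



-- ===== LEMMAS AND PROOFS =====

-- fuel-indexed select-first permutation generator (proof-only reference)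
def permsAux : Nat → List Int → List (List Int)
  | 0, _ => [[]]
  | k+1, l => (List.range l.length).flatMap (fun i =>
      (permsAux k (l.take i ++ l.drop (i + 1))).map (fun p => l.getD i 0 :: p))

def okLast (p : List Int) : Bool :=
  decide (p ≠ []) &&
    (PySem.List.pyGetD p (-1) 0 == 1 || PySem.List.pyGetD p (-1) 0 == 3 ||
     PySem.List.pyGetD p (-1) 0 == 7)

theorem slices_eq (l : List Int) (i : Nat) :
    PySem.List.slice l (some 0) (some (i : Int)) ++
      PySem.List.slice l (some ((i : Int) + 1)) none = l.take i ++ l.drop (i + 1) := by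
  rw [PySem.List.slice_zero_start, PySem.List.slice_to_natCast,
      show ((i : Int) + 1) = ((i + 1 : Nat) : Int) by push_cast; ring,
      PySem.List.slice_from_natCast]

theorem okLast_cons (j : Int) (p : List Int) (hp : p ≠ []) :
    okLast (j :: p) = okLast p := by
  unfold okLast
  rw [PySem.List.pyGetD_neg_one (j :: p) 0 (List.cons_ne_nil j p),
      PySem.List.pyGetD_neg_one p 0 hp, List.getLast_cons hp]
  simp [hp]

theorem flatMap_congr_mem {α β : Type} (l : List α) (f g : α → List β)
    (h : ∀ x ∈ l, f x = g x) : l.flatMap f = l.flatMap g := by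
  induction l with
  | nil => rfl
  | cons a t ih =>
    simp only [List.flatMap_cons, h a (by simp),
      ih (fun x hx => h x (by simp [hx]))]

theorem flatMap_map_mine {α β γ : Type} (l : List α) (f : α → β) (g : β → List γ) :
    (l.map f).flatMap g = l.flatMap (fun x => g (f x)) := by
  induction l with
  | nil => rfl
  | cons a t ih => simp only [List.map_cons, List.flatMap_cons, ih]

theorem map_flatMap_mine {α β γ : Type} (l : List α) (f : α → List β) (g : β → γ) :
    (l.flatMap f).map g = l.flatMap (fun x => (f x).map g) := by
  induction l with
  | nil => rfl
  | cons a t ih => simp only [List.flatMap_cons, List.map_append, ih]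

theorem attach_flatMap {α β : Type} (l : List α) (g : α → List β) :
    l.attach.flatMap (fun i => g i.1) = l.flatMap g := by
  conv_rhs => rw [← List.attach_map_subtype_val l]
  rw [flatMap_map_mine l.attach Subtype.val g]

theorem mem_permsAux_length : ∀ (k : Nat) (l : List Int), l.length = k →
    ∀ p ∈ permsAux k l, p.length = k := by
  intro k
  induction k with
  | zero => intro l hl p hp; simp [permsAux] at hp; simp [hp]
  | succ k ih =>
    intro l hl p hp
    rw [permsAux] at hp
    simp only [List.mem_flatMap, List.mem_map, List.mem_range] at hp
    obtain ⟨i, hi, q, hq, rfl⟩ := hp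
    have := ih (l.take i ++ l.drop (i + 1)) (by simp; omega) q hq
    simp [this]

theorem A_eq_aux : ∀ (n : Nat) (l : List Int), l.length = n →
    permutation1 l = (permsAux n l).filter okLast := by
  intro n
  induction n with
  | zero =>
    intro l hl
    cases l with
    | nil =>
      rw [permutation1]
      simp [permsAux, okLast]
    | cons a t => simp at hl
  | succ n ih =>
    intro l hl
    rw [permutation1]
    by_cases h1 : l.length = 1
    · obtain ⟨m, rfl⟩ : ∃ m, l = [m] := by
        cases l with
        | nil => simp at h1
        | cons a t => cases t with
          | nil => exact ⟨a, rfl⟩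
          | cons b u => simp at h1
      obtain rfl : n = 0 := by omega
      have hperm1 : permsAux (0 + 1) [m] = [[m]] := by
        rw [permsAux]
        simp [permsAux]
      have hfilter : List.filter okLast [[m]] =
          if m = 1 ∨ m = 3 ∨ m = 7 then [[m]] else [] := by
        by_cases hc : m = 1 ∨ m = 3 ∨ m = 7
        · rw [if_pos hc]
          have hok : okLast [m] = true := by
            unfold okLast
            rw [PySem.List.pyGetD_neg_one [m] 0 (List.cons_ne_nil m [])]
            rcases hc with rfl | rfl | rfl <;> simp
          simp [List.filter, hok]
        · rw [if_neg hc]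
          rw [not_or, not_or] at hc
          have hok : okLast [m] = false := by
            unfold okLast
            rw [PySem.List.pyGetD_neg_one [m] 0 (List.cons_ne_nil m [])]
            have e1 : (m == (1 : Int)) = false := beq_eq_false_iff_ne.mpr hc.1
            have e3 : (m == (3 : Int)) = false := beq_eq_false_iff_ne.mpr hc.2.1
            have e7 : (m == (7 : Int)) = false := beq_eq_false_iff_ne.mpr hc.2.2
            simp [List.getLast_singleton, e1, e3, e7]
          simp [List.filter, hok]
      rw [hperm1, hfilter]
      simp [PySem.List.pyGetD_zero_cons]
    · -- length of l is n + 1 with n ≥ 1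
      have hn1 : 1 ≤ n := by omega
      simp only [h1, if_false]
      have hbody : (fun (acc : List (List Int)) (i : {x // x ∈ List.range l.length}) =>
          (permutation1 (PySem.List.slice l (some 0) (some (i.1 : Int)) ++
            PySem.List.slice l (some ((i.1 : Int) + 1)) none)).foldl
            (fun acc ll => acc ++ [PySem.List.pyGetD l (i.1 : Int) 0 :: ll]) acc)
          = (fun acc i => acc ++
              ((permsAux n (l.take i.1 ++ l.drop (i.1 + 1))).filter okLast).map
                (fun ll => l.getD i.1 0 :: ll)) := by
        funext acc i
        have hi : i.1 < l.length := List.mem_range.mp i.2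
        rw [PySem.List.foldl_append_singleton_eq_map, slices_eq,
            ih _ (by simp; omega), PySem.List.pyGetD_natCast]
      rw [hbody, PySem.List.foldl_append_eq_flatMap, List.nil_append,
          attach_flatMap (List.range l.length) (fun i =>
            ((permsAux n (l.take i ++ l.drop (i + 1))).filter okLast).map
              (fun ll => l.getD i 0 :: ll))]
      conv_rhs => rw [permsAux]
      rw [List.filter_flatMap]
      apply flatMap_congr_mem
      intro i hi
      have hi' : i < l.length := List.mem_range.mp hi
      rw [List.filter_map]
      congr 1
      apply List.filter_congr
      intro p hp
      have hplen := mem_permsAux_length n (l.take i ++ l.drop (i + 1))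
        (by simp; omega) p hp
      have hpne : p ≠ [] := by
        intro hnil
        rw [hnil] at hplen
        simp at hplen
        omega
      exact (okLast_cons (l.getD i 0) p hpne).symm

-- the BFS expansion step of port B, named for the proofs
def stepB (fr : List (List Int × List Int)) : List (List Int × List Int) :=
  fr.flatMap (fun pr =>
    (List.range pr.2.length).map (fun (i : Nat) =>
      (pr.1 ++ [PySem.List.pyGetD pr.2 (i : Int) 0],
       PySem.List.slice pr.2 (some 0) (some (i : Int)) ++
       PySem.List.slice pr.2 (some ((i : Int) + 1)) none)))

theorem foldl_iterate {α β : Type} (f : α → α) :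
    ∀ (xs : List β) (a : α), xs.foldl (fun x _ => f x) a = f^[xs.length] a := by
  intro xs
  induction xs with
  | nil => intro a; rfl
  | cons x t ih => intro a; simp [ih, Function.iterate_succ_apply]

theorem expand_one (pre rem : List Int) (k : Nat) :
    ((List.range rem.length).map (fun (i : Nat) =>
        (pre ++ [PySem.List.pyGetD rem (i : Int) 0],
         PySem.List.slice rem (some 0) (some (i : Int)) ++
         PySem.List.slice rem (some ((i : Int) + 1)) none))).flatMap
      (fun pr => (permsAux k pr.2).map (fun p => (pr.1 ++ p, ([] : List Int))))
    = (permsAux (k + 1) rem).map (fun p => (pre ++ p, ([] : List Int))) := by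
  trans ((List.range rem.length).flatMap (fun (i : Nat) =>
    (permsAux k (rem.take i ++ rem.drop (i + 1))).map
      (fun p => (pre ++ [PySem.List.pyGetD rem (i : Int) 0] ++ p, ([] : List Int)))))
  · rw [flatMap_map_mine (List.range rem.length)
      (fun (i : Nat) =>
        (pre ++ [PySem.List.pyGetD rem (i : Int) 0],
         PySem.List.slice rem (some 0) (some (i : Int)) ++
         PySem.List.slice rem (some ((i : Int) + 1)) none))
      (fun pr => (permsAux k pr.2).map (fun p => (pr.1 ++ p, ([] : List Int))))]
    apply flatMap_congr_mem
    intro i _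
    dsimp only
    rw [slices_eq]
  · rw [permsAux, map_flatMap_mine (List.range rem.length)
      (fun i => (permsAux k (rem.take i ++ rem.drop (i + 1))).map
        (fun p => rem.getD i 0 :: p))
      (fun p => (pre ++ p, ([] : List Int)))]
    apply flatMap_congr_mem
    intro i _
    rw [List.map_map, PySem.List.pyGetD_natCast]
    apply List.map_congr_left
    intro p _
    simp

theorem stepB_iter : ∀ (k : Nat) (fr : List (List Int × List Int)),
    (∀ pr ∈ fr, pr.2.length = k) →
    stepB^[k] fr
      = fr.flatMap (fun pr => (permsAux k pr.2).map (fun p => (pr.1 ++ p, ([] : List Int)))) := by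
  intro k
  induction k with
  | zero =>
    intro fr h
    simp only [Function.iterate_zero, id_eq]
    induction fr with
    | nil => rfl
    | cons pr t ih =>
      obtain ⟨a, b⟩ := pr
      have h2 : b = [] := by
        have := h (a, b) (by simp)
        simpa using this
      subst h2
      rw [List.flatMap_cons, ← ih (fun q hq => h q (by simp [hq]))]
      simp [permsAux]
  | succ k IHk =>
    intro fr h
    have hstep : ∀ pr' ∈ stepB fr, pr'.2.length = k := by
      intro pr' hpr'
      simp only [stepB, List.mem_flatMap, List.mem_map, List.mem_range] at hpr'
      obtain ⟨pr, hpr, i, hi, rfl⟩ := hpr'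
      have := h pr hpr
      dsimp only
      rw [slices_eq]
      simp
      omega
    rw [Function.iterate_succ_apply, IHk (stepB fr) hstep, stepB, List.flatMap_assoc]
    apply flatMap_congr_mem
    intro pr hpr
    exact expand_one pr.1 pr.2 k

theorem A_eq (l : List Int) : permutation1 l = (permsAux l.length l).filter okLast :=
  A_eq_aux l.length l rfl

theorem B_eq (l : List Int) : permutation1_alt l = (permsAux l.length l).filter okLast := by
  have key : permutation1_alt l =
      ((List.foldl (fun fr (_ : Nat) => stepB fr) [(([] : List Int), l)]
          (List.range l.length)).filter
        (fun pr => decide (pr.1 ≠ []) &&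
          (PySem.List.pyGetD pr.1 (-1) 0 == 1 || PySem.List.pyGetD pr.1 (-1) 0 == 3 ||
           PySem.List.pyGetD pr.1 (-1) 0 == 7))).map Prod.fst := rfl
  rw [key, foldl_iterate stepB, List.length_range,
      stepB_iter l.length [([], l)] (by simp)]
  simp only [List.flatMap_cons, List.flatMap_nil, List.append_nil, List.nil_append]
  rw [List.filter_map, List.map_map]
  have hfc : List.filter ((fun pr : List Int × List Int =>
      decide (pr.1 ≠ []) &&
        (PySem.List.pyGetD pr.1 (-1) 0 == 1 || PySem.List.pyGetD pr.1 (-1) 0 == 3 ||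
         PySem.List.pyGetD pr.1 (-1) 0 == 7)) ∘ (fun p => (p, ([] : List Int))))
      (permsAux l.length l) = (permsAux l.length l).filter okLast := by
    apply List.filter_congr
    intro p _
    rfl
  rw [hfc, show (Prod.fst ∘ fun p : List Int => (p, ([] : List Int))) = id from rfl,
      List.map_id]

-- ===== VERDICT (by name: the statement is the Claim_ definition above) =====
theorem permutation1_spec : Claim_equal_permutation1 := by
  intro l _
  unfold Spec_permutation1
  rw [A_eq, B_eq]
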